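-- pv_equiv track=rewrite | github.com/sigurdvaa/adventofcode | 2018/02-Inventory-Management-System.py | exactly_n_letter
-- ===== SOURCE A (Python) =====
-- def exactly_n_letter(string: str, n: int) -> bool:
--     chars = {}
--     for c in string:
--         if c not in chars:
--             chars[c] = 1
--         else:
--             chars[c] += 1
--     for c in chars:
--         if chars[c] == n:
--             return True
--     return False
-- ===== SOURCE B (Python) =====
-- def exactly_n_letter(string: str, n: int) -> bool:
--     # Sort the characters; equal characters become contiguous runs,
--     # then a single scan checks whether any run has length exactly n.
--     s = sorted(string)
--     i = 0
--     length = len(s)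
--     while i < length:
--         j = i + 1
--         while j < length and s[j] == s[i]:
--             j += 1
--         if j - i == n:
--             return True
--         i = j
--     return False
-- ===== Notes on version B (the rewrite author's own statement) =====
-- stated objective: alternative
-- what changed: Replaces the frequency dictionary (build table, then scan the table) with sort-then-run-length-scan: the characters are sorted so equal characters are contiguous, and one scan over the sorted list checks whether any run has length exactly n; no counting table exists at any point.
import Mathlib
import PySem

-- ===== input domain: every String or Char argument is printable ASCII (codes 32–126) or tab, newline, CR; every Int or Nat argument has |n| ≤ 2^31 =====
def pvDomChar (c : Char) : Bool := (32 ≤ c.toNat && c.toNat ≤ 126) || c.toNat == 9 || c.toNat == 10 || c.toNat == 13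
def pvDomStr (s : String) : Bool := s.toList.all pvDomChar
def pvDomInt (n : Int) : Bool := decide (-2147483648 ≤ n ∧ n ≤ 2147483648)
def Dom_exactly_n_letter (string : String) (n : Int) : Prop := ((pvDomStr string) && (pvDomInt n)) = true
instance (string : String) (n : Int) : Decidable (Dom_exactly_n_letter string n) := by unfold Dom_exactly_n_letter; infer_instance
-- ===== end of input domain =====

-- B replaces A's frequency dictionary with sort-then-run-length-scan: sorting makes equal
-- characters contiguous, and one scan over the sorted list looks for a run of length n.

-- ===== PORT A =====
-- chars = {}; for c in string: if c not in chars: chars[c] = 1 else chars[c] += 1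
-- then: for c in chars: if chars[c] == n: return True; return False
def exactly_n_letter (string : String) (n : Int) : Bool :=
  let chars : PySem.Dict Char Int :=
    string.toList.foldl
      (fun d c => if d.contains c = false then d.insert c 1 else d.insert c (d.getD c 0 + 1))
      PySem.Dict.empty
  chars.keys.any (fun c => chars.getD c 0 == n)

-- ===== PORT B =====
-- the outer while loop over the sorted list: each step consumes one run
-- (the inner 'while j < length and s[j] == s[i]: j += 1' is the takeWhile/dropWhile
-- of the run of characters equal to the run's first character)
def pvRunScan (n : Int) : List Char → Bool
  | [] => false
  | c :: rest =>
    if ((1 + (rest.takeWhile (fun x => x == c)).length : Int) == n) then true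
    else pvRunScan n (rest.dropWhile (fun x => x == c))
termination_by l => l.length
decreasing_by
  have := List.length_dropWhile_le (fun x => x == c) rest
  simp; omega

-- s = sorted(string); then scan the runs
def exactly_n_letter_alt (string : String) (n : Int) : Bool :=
  pvRunScan n (PySem.List.sorted string.toList (fun c => c) false)

-- ===== PRECONDITION & SPEC =====
def Spec_exactly_n_letter (string : String) (n : Int) (out : Bool) : Prop := out = exactly_n_letter_alt string n
instance (string : String) (n : Int) (out : Bool) : Decidable (Spec_exactly_n_letter string n out) := by unfold Spec_exactly_n_letter; infer_instance

-- ===== CLAIM (what is proved, stated in full; the proofs are below) =====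
def Claim_equal_exactly_n_letter : Prop := ∀ (string : String) (n : Int), Dom_exactly_n_letter string n → Spec_exactly_n_letter string n (exactly_n_letter string n)

-- ===== LEMMAS AND PROOFS =====

-- A's increment loop is exactly the counter fold.
theorem fold_eq_counter (l : List Char) :
    l.foldl (fun d c => if d.contains c = false then d.insert c 1 else d.insert c (d.getD c 0 + 1))
      PySem.Dict.empty = PySem.Dict.counter l := by
  rw [← PySem.Dict.foldl_insert_getD_add_one_eq_counter]
  congr 1
  funext d c
  by_cases h : d.contains c
  · simp [h]
  · simp [h, PySem.Dict.getD_of_not_contains d 0 (by simpa using h)]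

-- On a ≤-sorted list, the run scan finds a run of length n iff some character occurs n times.

-- all characters of the run (takeWhile) equal the run head
theorem count_takeWhile_self (c : Char) (rest : List Char) :
    (rest.takeWhile (fun x => x == c)).count c = (rest.takeWhile (fun x => x == c)).length := by
  apply List.count_eq_length.mpr
  intro b hb
  have hb2 : b = c := by simpa using List.mem_takeWhile_imp hb
  simp [hb2]

theorem count_takeWhile_other (c c' : Char) (rest : List Char) (hne : c' ≠ c) :
    (rest.takeWhile (fun x => x == c)).count c' = 0 := by
  apply List.count_eq_zero.mpr
  intro hmem
  have := List.mem_takeWhile_imp hmem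
  simp at this
  exact hne this

-- on a sorted list, the run head never reappears after its run
theorem not_mem_dropWhile_sorted (c : Char) (rest : List Char)
    (hpw : (c :: rest).Pairwise (· ≤ ·)) :
    c ∉ rest.dropWhile (fun x => x == c) := by
  intro hmem
  cases hdwe : rest.dropWhile (fun x => x == c) with
  | nil => simp [hdwe] at hmem
  | cons h t =>
    have hw : rest.dropWhile (fun x => x == c) ≠ [] := by simp [hdwe]
    have h0 := List.head_dropWhile_not (fun x => x == c) hw
    have h1 : (rest.dropWhile (fun x => x == c)).head? = some h := by rw [hdwe]; rfl
    rw [List.head?_eq_some_head hw] at h1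
    rw [Option.some.injEq] at h1
    rw [h1] at h0
    have hhc : h ≠ c := by simpa using h0
    have hhr : h ∈ rest := (List.dropWhile_sublist _).mem (by rw [hdwe]; exact List.mem_cons_self)
    have hch : c ≤ h := (List.pairwise_cons.mp hpw).1 h hhr
    have hlt : c < h := lt_of_le_of_ne hch (Ne.symm hhc)
    have hpwdw : (h :: t).Pairwise (· ≤ ·) := by
      rw [← hdwe]
      exact List.Pairwise.sublist (List.dropWhile_sublist _) (List.pairwise_cons.mp hpw).2
    rw [hdwe] at hmem
    rcases List.mem_cons.mp hmem with heq | hmem'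
    · exact hhc heq.symm
    · exact absurd ((List.pairwise_cons.mp hpwdw).1 c hmem') (not_le.mpr hlt)

-- the head's total count is 1 + its run length (sorted list)
theorem count_head_sorted (c : Char) (rest : List Char)
    (hpw : (c :: rest).Pairwise (· ≤ ·)) :
    (c :: rest).count c = 1 + (rest.takeWhile (fun x => x == c)).length := by
  have hsplit := List.takeWhile_append_dropWhile (p := fun x => x == c) (l := rest)
  have hdw : (rest.dropWhile (fun x => x == c)).count c = 0 :=
    List.count_eq_zero.mpr (not_mem_dropWhile_sorted c rest hpw)
  calc (c :: rest).count c = rest.count c + 1 := List.count_cons_self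
    _ = ((rest.takeWhile (fun x => x == c)) ++ (rest.dropWhile (fun x => x == c))).count c + 1 := by
        rw [hsplit]
    _ = 1 + (rest.takeWhile (fun x => x == c)).length := by
        rw [List.count_append, count_takeWhile_self, hdw]; omega

-- a character of the tail after the run has the same count there as in the whole list
theorem count_other_sorted (c c' : Char) (rest : List Char) (hne : c' ≠ c) :
    (c :: rest).count c' = (rest.dropWhile (fun x => x == c)).count c' := by
  have hsplit := List.takeWhile_append_dropWhile (p := fun x => x == c) (l := rest)
  calc (c :: rest).count c' = rest.count c' := by
        rw [List.count_cons_of_ne hne.symm]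
    _ = ((rest.takeWhile (fun x => x == c)) ++ (rest.dropWhile (fun x => x == c))).count c' := by
        rw [hsplit]
    _ = (rest.dropWhile (fun x => x == c)).count c' := by
        rw [List.count_append, count_takeWhile_other c c' rest hne]; omega

theorem pvRunScan_iff (n : Int) : ∀ (l : List Char), l.Pairwise (· ≤ ·) →
    (pvRunScan n l = true ↔ ∃ c ∈ l, (l.count c : Int) = n) := by
  intro l
  induction l using pvRunScan.induct n with
  | case1 => simp [pvRunScan]
  | case2 c rest hrun =>
    intro hpw
    rw [pvRunScan, if_pos hrun]
    have hn : (1 : Int) + (rest.takeWhile (fun x => x == c)).length = n := by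
      simpa using hrun
    simp only [true_iff]
    refine ⟨c, List.mem_cons_self, ?_⟩
    rw [count_head_sorted c rest hpw]
    push_cast
    omega
  | case3 c rest hrun ih =>
    intro hpw
    have hpwr : rest.Pairwise (· ≤ ·) := (List.pairwise_cons.mp hpw).2
    have hpwdw : (rest.dropWhile (fun x => x == c)).Pairwise (· ≤ ·) :=
      List.Pairwise.sublist (List.dropWhile_sublist _) hpwr
    have hn : ((1 : Int) + (rest.takeWhile (fun x => x == c)).length) ≠ n := by
      simpa using hrun
    rw [pvRunScan, if_neg hrun, ih hpwdw]
    constructor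
    · rintro ⟨c', hc', hcnt⟩
      have hne : c' ≠ c := fun h => not_mem_dropWhile_sorted c rest hpw (h ▸ hc')
      refine ⟨c', List.mem_cons_of_mem c ((List.dropWhile_sublist _).mem hc'), ?_⟩
      rw [count_other_sorted c c' rest hne]
      exact hcnt
    · rintro ⟨c', hc', hcnt⟩
      by_cases hne : c' = c
      · subst hne
        rw [count_head_sorted c' rest hpw] at hcnt
        push_cast at hcnt
        omega
      · have hc'r : c' ∈ rest := by
          rcases List.mem_cons.mp hc' with h | h
          · exact absurd h hne
          · exact h
        have hc'dw : c' ∈ rest.dropWhile (fun x => x == c) := by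
          have := List.takeWhile_append_dropWhile (p := fun x => x == c) (l := rest)
          rw [← this] at hc'r
          rcases List.mem_append.mp hc'r with h | h
          · have := List.mem_takeWhile_imp h
            simp at this
            exact absurd this hne
          · exact h
        refine ⟨c', hc'dw, ?_⟩
        rw [← count_other_sorted c c' rest hne]
        exact hcnt

-- ===== VERDICT (by name: the statement is the Claim_ definition above) =====
theorem exactly_n_letter_spec : Claim_equal_exactly_n_letter := by
  intro string n _
  unfold Spec_exactly_n_letter exactly_n_letter exactly_n_letter_alt
  simp only [fold_eq_counter, PySem.Dict.keys_counter]
  rw [Bool.eq_iff_iff]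
  have hperm : (PySem.List.sorted string.toList (fun c => c) false).Perm string.toList :=
    PySem.List.sorted_perm _ _ _
  have hpw : (PySem.List.sorted string.toList (fun c => c) false).Pairwise (· ≤ ·) :=
    PySem.List.sorted_pairwise _ _
  rw [pvRunScan_iff n _ hpw]
  constructor
  · rintro h
    rw [List.any_eq_true] at h
    obtain ⟨c, hc, hcn⟩ := h
    refine ⟨c, hperm.mem_iff.mpr ?_, ?_⟩
    · exact (PySem.Set.mem_ofList _ _).mp hc
    · rw [hperm.count_eq]
      simpa [PySem.Dict.getD_counter] using hcn
  · rintro ⟨c, hc, hcn⟩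
    rw [List.any_eq_true]
    refine ⟨c, (PySem.Set.mem_ofList _ _).mpr (hperm.mem_iff.mp hc), ?_⟩
    rw [hperm.count_eq] at hcn
    simp [PySem.Dict.getD_counter, hcn]
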